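-- pv_equiv track=rewrite | github.com/ochenafanbangla-glitch/AI-Master-Pro10 | models/model_a_core.py | _strategy_streak_reversal
-- ===== SOURCE A (Python) =====
-- def _strategy_streak_reversal(last_results):
--     streak = 1
--     for i in range(len(last_results)-2, -1, -1):
--         if last_results[i] == last_results[-1]: streak += 1
--         else: break
--     if streak >= 4:
--         return ("SMALL" if last_results[-1] == "B" else "BIG"), 70 + (streak * 5)
--     return None, 0
-- ===== SOURCE B (Python) =====
-- def _strategy_streak_reversal(last_results):
--     # Forward pass building the list of consecutive runs, then inspect the final run.
--     runs = []
--     for x in last_results: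
--         if runs and runs[-1][0] == x:
--             runs[-1][1] += 1
--         else:
--             runs.append([x, 1])
--     if not runs:
--         return None, 0
--     value, streak = runs[-1]
--     if streak < 4:
--         return None, 0
--     return ("SMALL" if value == "B" else "BIG"), 70 + streak * 5
-- ===== Notes on version B (the rewrite author's own statement) =====
-- stated objective: alternative
-- what changed: A scans backward over indices with a break to count the trailing streak; B makes one forward pass building the list of consecutive runs and reads the final run's value and length.
import Mathlib
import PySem

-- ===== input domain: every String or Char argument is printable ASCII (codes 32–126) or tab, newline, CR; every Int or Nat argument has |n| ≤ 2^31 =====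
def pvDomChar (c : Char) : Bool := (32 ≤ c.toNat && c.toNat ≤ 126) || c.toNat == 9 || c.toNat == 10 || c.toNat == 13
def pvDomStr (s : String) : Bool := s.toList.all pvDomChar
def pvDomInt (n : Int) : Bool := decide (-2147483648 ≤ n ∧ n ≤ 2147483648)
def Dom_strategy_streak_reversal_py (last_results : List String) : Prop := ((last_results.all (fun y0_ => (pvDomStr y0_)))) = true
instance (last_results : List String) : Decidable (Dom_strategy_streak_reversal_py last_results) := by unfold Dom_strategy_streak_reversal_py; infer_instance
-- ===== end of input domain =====

-- B replaces A's backward index scan with a forward pass building the run list (alternative decomposition, same cost).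

-- ===== PORT A =====
-- the backward 'for i in range(len-2, -1, -1)' loop with its break; indices visited are
-- always in range, so pyGet? returns some there, exactly as Python indexing returns
def pvAStreakLoop (xs : List String) : List Int → Int → Int
  | [], s => s
  | i :: rest, s =>
    if PySem.List.pyGet? xs i = PySem.List.pyGet? xs (-1) then pvAStreakLoop xs rest (s + 1)
    else s

def strategy_streak_reversal_py (last_results : List String) : Option String × Int :=
  let streak := pvAStreakLoop last_results
      (PySem.List.pyRange ((last_results.length : Int) - 2) (-1) (-1)) 1
  if streak ≥ 4 then
    ((if PySem.List.pyGet? last_results (-1) = some "B" then some "SMALL" else some "BIG"),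
      70 + streak * 5)
  else (none, 0)

-- ===== PORT B =====
-- one step of B's forward loop: extend the last run or start a new one
def pvRunStep (runs : List (String × Int)) (x : String) : List (String × Int) :=
  match runs.getLast? with
  | some (k, c) => if k = x then runs.dropLast ++ [(k, c + 1)] else runs ++ [(x, 1)]
  | none => runs ++ [(x, 1)]

def strategy_streak_reversal_py_alt (last_results : List String) : Option String × Int :=
  match (last_results.foldl pvRunStep []).getLast? with
  | none => (none, 0)
  | some (v, streak) =>
    if streak < 4 then (none, 0)
    else (some (if v = "B" then "SMALL" else "BIG"), 70 + streak * 5)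

-- ===== PRECONDITION & SPEC =====
def Spec_strategy_streak_reversal_py (last_results : List String) (out : Option String × Int) : Prop := out = strategy_streak_reversal_py_alt last_results
instance (last_results : List String) (out : Option String × Int) : Decidable (Spec_strategy_streak_reversal_py last_results out) := by unfold Spec_strategy_streak_reversal_py; infer_instance

-- ===== CLAIM (what is proved, stated in full; the proofs are below) =====
def Claim_equal_strategy_streak_reversal_py : Prop := ∀ (last_results : List String), Dom_strategy_streak_reversal_py last_results → Spec_strategy_streak_reversal_py last_results (strategy_streak_reversal_py last_results)

-- ===== LEMMAS AND PROOFS =====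

-- length of the run of elements equal to a at the front of a list
def pvTcount (a : String) : List String → Int
  | [] => 0
  | x :: r => if x = a then 1 + pvTcount a r else 0

-- A's backward loop starting at index k counts, into s, the leading run of
-- (xs.take (k+1)).reverse equal to the last element a
theorem pvAStreakLoop_eq (k : Nat) : ∀ (xs : List String) (a : String) (s : Int),
    k < xs.length → PySem.List.pyGet? xs (-1) = some a →
    pvAStreakLoop xs (PySem.List.pyRange (k : Int) (-1) (-1)) s
      = s + pvTcount a ((xs.take (k + 1)).reverse) := by
  induction k with
  | zero =>
    intro xs a s hk hlast
    rw [PySem.List.pyRange_neg_one_cons (by omega : (-1 : Int) < (0 : Nat))]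
    rw [show ((0 : Nat) : Int) - 1 = -1 by omega,
        PySem.List.pyRange_neg_one_eq_nil (by omega : (-1 : Int) ≤ -1)]
    have h0 : PySem.List.pyGet? xs ((0 : Nat) : Int) = some xs[0] :=
      PySem.List.pyGet?_ofNat _ _ hk
    have htake : xs.take 1 = [xs[0]] := by
      cases xs with
      | nil => simp at hk
      | cons y ys => simp
    rw [pvAStreakLoop, h0, hlast, htake]
    by_cases hxa : xs[0] = a
    · simp [hxa, pvAStreakLoop, pvTcount]
    · simp [hxa, pvTcount]
  | succ j ih =>
    intro xs a s hk hlast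
    rw [PySem.List.pyRange_neg_one_cons (by omega : (-1 : Int) < ((j + 1 : Nat) : Int))]
    have hj : ((j + 1 : Nat) : Int) - 1 = ((j : Nat) : Int) := by push_cast; omega
    have hget : PySem.List.pyGet? xs (((j + 1 : Nat)) : Int) = some xs[j + 1] :=
      PySem.List.pyGet?_ofNat _ _ hk
    have htake : xs.take (j + 1 + 1) = xs.take (j + 1) ++ [xs[j + 1]] := by
      rw [List.take_add_one]
      simp [List.getElem?_eq_getElem hk]
    rw [pvAStreakLoop, hget, hlast, hj, htake]
    by_cases hxa : xs[j + 1] = a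
    · rw [if_pos (by simp [hxa]), ih xs a (s + 1) (by omega) hlast,
        List.reverse_append]
      simp only [List.reverse_cons, List.reverse_nil, List.nil_append,
        List.singleton_append, pvTcount, if_pos hxa]
      ring
    · rw [if_neg (by simp [hxa]), List.reverse_append]
      simp only [List.reverse_cons, List.reverse_nil, List.nil_append,
        List.singleton_append, pvTcount, if_neg hxa]
      ring

-- B's run list of ys ++ [a] ends in the run (a, 1 + leading run of ys.reverse equal to a)
theorem pvRuns_getLast (ys : List String) : ∀ (a : String),
    (List.foldl pvRunStep [] (ys ++ [a])).getLast? = some (a, 1 + pvTcount a ys.reverse) := by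
  induction ys using List.reverseRecOn with
  | nil => intro a; simp [pvRunStep, pvTcount]
  | append_singleton zs b ih =>
    intro a
    rw [show zs ++ [b] ++ [a] = (zs ++ [b]) ++ [a] by simp, List.foldl_append]
    have hr := ih b
    rw [List.foldl_cons, List.foldl_nil]
    simp only [pvRunStep, hr]
    by_cases hba : b = a
    · subst hba
      have hthis : pvTcount b ((zs ++ [b]).reverse) = 1 + pvTcount b zs.reverse := by
        simp [pvTcount]
      rw [if_pos rfl, List.getLast?_concat, hthis]
      simp only [Option.some.injEq, Prod.mk.injEq, true_and]
      ring
    · have hthis : pvTcount a ((zs ++ [b]).reverse) = 0 := by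
        simp [pvTcount, hba]
      rw [if_neg hba, List.getLast?_concat, hthis]
      norm_num

-- ===== VERDICT (by name: the statement is the Claim_ definition above) =====
theorem strategy_streak_reversal_py_spec : Claim_equal_strategy_streak_reversal_py := by
  intro xs _
  unfold Spec_strategy_streak_reversal_py
  rcases List.eq_nil_or_concat xs with hnil | ⟨ys, a, h⟩
  · subst hnil; decide
  · rw [List.concat_eq_append] at h
    subst h
    have hlast : PySem.List.pyGet? (ys ++ [a]) (-1) = some a :=
      PySem.List.pyGet?_neg_one_append_singleton ys a
    have hB := pvRuns_getLast ys a
    have hstreak : pvAStreakLoop (ys ++ [a])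
        (PySem.List.pyRange (((ys ++ [a]).length : Int) - 2) (-1) (-1)) 1
        = 1 + pvTcount a ys.reverse := by
      rcases List.eq_nil_or_concat ys with hysnil | ⟨zs, b, hys⟩
      · subst hysnil
        norm_num [pvAStreakLoop, pvTcount, PySem.List.pyRange_neg_one_eq_nil]
      · have hlen : 1 ≤ ys.length := by subst hys; simp
        have hk : ys.length - 1 < (ys ++ [a]).length := by simp
        have hcast : (((ys.length - 1 : Nat)) : Int) = ((ys ++ [a]).length : Int) - 2 := by
          simp; omega
        have hA := pvAStreakLoop_eq (ys.length - 1) (ys ++ [a]) a 1 hk hlast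
        rw [hcast] at hA
        have htake : (ys ++ [a]).take (ys.length - 1 + 1) = ys := by
          rw [show ys.length - 1 + 1 = ys.length by omega]
          simp
        rw [htake] at hA
        rw [hA]
    simp only [strategy_streak_reversal_py, strategy_streak_reversal_py_alt, hB, hstreak, hlast]
    by_cases h4 : (1 : Int) + pvTcount a ys.reverse ≥ 4
    · rw [if_pos h4, if_neg (show ¬ (1 + pvTcount a ys.reverse < 4) by omega)]
      by_cases hb : a = "B" <;> simp [hb]
    · rw [if_neg h4, if_pos (show (1 + pvTcount a ys.reverse < 4) by omega)]
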